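-- pv_equiv track=rewrite | github.com/Ascendral/KlomboAGI | klomboagi/reasoning/arc_lines.py | _connect_pairs_h
-- ===== SOURCE A (Python) =====
-- def _connect_pairs_h(g,bg):
--     R,C=len(g),len(g[0]); r=[row[:] for row in g]
--     for i in range(R):
--         seen={}
--         for c in range(C):
--             if g[i][c]!=bg:
--                 color=g[i][c]
--                 if color in seen:
--                     for c2 in range(seen[color]+1,c):
--                         if r[i][c2]==bg: r[i][c2]=color
--                 seen[color]=c
--     return r
-- ===== SOURCE B (Python) =====
-- def _connect_pairs_h(g, bg):
--     # Mutation-free per-cell computation over the grid width C = len(g[0]):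
--     # one pass per row builds a previous-occurrence table, then each background
--     # cell is filled directly with the color of the nearest later non-background
--     # cell whose previous same-color occurrence lies strictly before it.
--     C = len(g[0])
--     out = []
--     for row in g:
--         last = {}
--         prev = []
--         for b in range(C):
--             v = row[b]
--             prev.append(last.get(v) if v != bg else None)
--             if v != bg:
--                 last[v] = b
--         new = list(row)
--         for c in range(C):
--             if row[c] == bg:
--                 for b in range(c + 1, C):
--                     p = prev[b]
--                     if p is not None and p < c:
--                         new[c] = row[b]
--                         break
--         out.append(new)
--     return out
-- ===== Notes on version B (the rewrite author's own statement) =====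
-- stated objective: alternative
-- what changed: A scans each row with a last-seen dictionary and, at every repeated color, re-walks and overwrites the background cells of the interval back to the previous occurrence; B is pair-interval-free: it builds a previous-occurrence table in one pass and fills each background cell directly by a per-cell search for the nearest later closer whose previous occurrence lies before the cell. Pre_ excludes exactly the inputs on which A raises IndexError: the empty grid and grids with a row shorter than the first row.
import Mathlib
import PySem

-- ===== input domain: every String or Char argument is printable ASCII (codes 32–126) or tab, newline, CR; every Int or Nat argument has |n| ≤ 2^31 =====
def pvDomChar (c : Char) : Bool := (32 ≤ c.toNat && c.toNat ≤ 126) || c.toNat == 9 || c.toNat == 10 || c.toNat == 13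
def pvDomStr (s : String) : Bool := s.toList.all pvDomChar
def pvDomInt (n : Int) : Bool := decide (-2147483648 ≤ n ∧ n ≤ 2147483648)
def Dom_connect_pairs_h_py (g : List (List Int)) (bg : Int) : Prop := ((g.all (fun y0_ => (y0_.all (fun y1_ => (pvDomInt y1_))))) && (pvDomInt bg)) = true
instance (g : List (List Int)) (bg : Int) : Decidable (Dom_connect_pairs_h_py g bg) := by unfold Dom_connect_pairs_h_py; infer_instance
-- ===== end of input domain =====

-- B computes each output cell by a direct per-cell formula over a previous-occurrence
-- table instead of A's in-place interval overwriting; objective: alternative (same cost).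

-- ===== PORT A =====
-- for c2 in range(seen[color]+1, c): if r[i][c2]==bg: r[i][c2]=color
def pvFillA (bg color : Int) (a c i : Nat) (r : List (List Int)) : List (List Int) :=
  (List.range' (a + 1) (c - (a + 1))).foldl
    (fun r c2 => if (r.getD i []).getD c2 0 = bg then r.modify i (fun row => row.set c2 color) else r) r

-- one step of the `for c in range(C)` loop of row i; state = (seen, r)
def pvStepA (g : List (List Int)) (bg : Int) (i : Nat)
    (st : PySem.Dict Int Nat × List (List Int)) (c : Nat) :
    PySem.Dict Int Nat × List (List Int) :=
  if (g.getD i []).getD c 0 ≠ bg then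
    let color := (g.getD i []).getD c 0
    let r' := match st.1.get? color with
      | some a => pvFillA bg color a c i st.2
      | none => st.2
    (st.1.insert color c, r')
  else st

def connect_pairs_h_py (g : List (List Int)) (bg : Int) : List (List Int) :=
  let C := (g.headD []).length
  (List.range g.length).foldl
    (fun r i => ((List.range C).foldl (pvStepA g bg i) (PySem.Dict.empty, r)).2) g

-- ===== PORT B =====
-- first pass of Source B: prev[b] = last.get(row[b]) for non-background cells, None otherwise
def pvPrevB (row : List Int) (bg : Int) (C : Nat) : List (Option Nat) :=
  ((List.range C).foldl (fun (st : PySem.Dict Int Nat × List (Option Nat)) b =>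
      let v := row.getD b 0
      if v ≠ bg then (st.1.insert v b, st.2 ++ [st.1.get? v])
      else (st.1, st.2 ++ [none])) (PySem.Dict.empty, [])).2

-- inner loop `for b in range(c+1, C): ... break` = find?
def pvFindB (prev : List (Option Nat)) (C c : Nat) : Option Nat :=
  (List.range' (c + 1) (C - (c + 1))).find? (fun b =>
    match prev.getD b none with
    | some a => decide (a < c)
    | none => false)

-- `new = list(row)`, then `for c in range(C): if row[c] == bg: ... new[c] = row[b]`
def pvRowB (row : List Int) (bg : Int) (C : Nat) : List Int :=
  let prev := pvPrevB row bg C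
  (List.range C).foldl (fun new c =>
    if row.getD c 0 = bg then
      match pvFindB prev C c with
      | some b => new.set c (row.getD b 0)
      | none => new
    else new) row

def connect_pairs_h_py_alt (g : List (List Int)) (bg : Int) : List (List Int) :=
  let C := (g.headD []).length
  g.map (fun row => pvRowB row bg C)

-- ===== PRECONDITION & SPEC =====
-- Pre_ excludes exactly the inputs on which A raises IndexError: the empty grid
-- (g[0] fails) and grids with a row shorter than the first row (g[i][c] fails).
def Pre_connect_pairs_h_py (g : List (List Int)) (_bg : Int) : Prop :=
  g ≠ [] ∧ ∀ row ∈ g, (g.headD []).length ≤ row.length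
instance (g : List (List Int)) (bg : Int) : Decidable (Pre_connect_pairs_h_py g bg) := by
  unfold Pre_connect_pairs_h_py; infer_instance

def pvWitness_connect_pairs_h_py : List (List Int) × Int := ([[1, 0, 1], [0, 2, 0]], 0)

def Spec_connect_pairs_h_py (g : List (List Int)) (bg : Int) (out : List (List Int)) : Prop := out = connect_pairs_h_py_alt g bg
instance (g : List (List Int)) (bg : Int) (out : List (List Int)) : Decidable (Spec_connect_pairs_h_py g bg out) := by unfold Spec_connect_pairs_h_py; infer_instance

-- ===== CLAIM (what is proved, stated in full; the proofs are below) =====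
def Claim_equal_connect_pairs_h_py : Prop := ∀ (g : List (List Int)) (bg : Int), Dom_connect_pairs_h_py g bg → Pre_connect_pairs_h_py g bg → Spec_connect_pairs_h_py g bg (connect_pairs_h_py g bg)


-- ===== LEMMAS AND PROOFS =====

-- ---- proof-side vocabulary (single-row view) ----

-- previous same-color occurrence of a non-background cell b (None for background cells)
def pvPO (row : List Int) (bg : Int) (b : Nat) : Option Nat :=
  if row.getD b 0 = bg then none
  else ((List.range b).filter (fun a => row.getD a 0 == row.getD b 0)).getLast?

-- the `seen`/`last` dictionary after scanning row[0:k]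
def pvSeen (row : List Int) (bg : Int) (k : Nat) : PySem.Dict Int Nat :=
  (List.range k).foldl
    (fun d c => if row.getD c 0 ≠ bg then d.insert (row.getD c 0) c else d) PySem.Dict.empty

def pvPred (row : List Int) (bg : Int) (c b : Nat) : Bool :=
  match pvPO row bg b with
  | some a => decide (a < c)
  | none => false

-- the color cell c has after the pairs closing at b < k have been processed
def pvFillUpto (row : List Int) (bg : Int) (k c : Nat) : Int :=
  match (List.range k).find? (fun b => decide (c < b) && pvPred row bg c b) with
  | some b => row.getD b 0
  | none => bg

def pvSpecRow (row : List Int) (bg : Int) (k : Nat) : List Int :=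
  row.mapIdx (fun j v => if v ≠ bg then v else pvFillUpto row bg k j)

-- single-row versions of A's loop bodies
def pvRowFill (bg color : Int) (a c : Nat) (cur : List Int) : List Int :=
  (List.range' (a + 1) (c - (a + 1))).foldl
    (fun cur c2 => if cur.getD c2 0 = bg then cur.set c2 color else cur) cur

def pvRowStep (row : List Int) (bg : Int)
    (st : PySem.Dict Int Nat × List Int) (c : Nat) : PySem.Dict Int Nat × List Int :=
  if row.getD c 0 ≠ bg then
    let color := row.getD c 0
    let cur' := match st.1.get? color with
      | some a => pvRowFill bg color a c st.2
      | none => st.2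
    (st.1.insert color c, cur')
  else st


-- getD of set within bounds
lemma pv_getD_set {α : Type} (l : List α) (i j : Nat) (v d : α) (hj : j < l.length) :
    (l.set i v).getD j d = if i = j then v else l.getD j d := by
  rw [List.getD_eq_getElem _ _ (by simpa using hj), List.getElem_set]
  split
  · rfl
  · exact (List.getD_eq_getElem l d hj).symm

-- the conditional-set fold over a contiguous index range, pointwise
lemma pvFillAux (bg color : Int) :
    ∀ (n s : Nat) (cur : List Int) (j : Nat), j < cur.length →
    ((List.range' s n).foldl (fun cur c2 => if cur.getD c2 0 = bg then cur.set c2 color else cur) cur).getD j 0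
      = if s ≤ j ∧ j < s + n ∧ cur.getD j 0 = bg then color else cur.getD j 0 := by
  intro n
  induction n with
  | zero => intro s cur j hj; simp only [List.range', List.foldl_nil]
            rw [if_neg (by rintro ⟨h1, h2, _⟩; omega)]
  | succ n ih =>
      intro s cur j hj
      rw [List.range'_succ, List.foldl_cons]
      by_cases hcs : cur.getD s 0 = bg
      · rw [if_pos hcs, ih (s+1) _ j (by simpa using hj)]
        rw [pv_getD_set _ _ _ _ _ hj]
        by_cases hsj : s = j
        · subst hsj
          rw [if_pos rfl, if_neg (by rintro ⟨h1, _, _⟩; omega), if_pos ⟨le_refl _, by omega, hcs⟩]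
        · rw [if_neg hsj]
          by_cases hc2 : s + 1 ≤ j ∧ j < s + 1 + n ∧ cur.getD j 0 = bg
          · rw [if_pos hc2, if_pos ⟨by omega, by omega, hc2.2.2⟩]
          · rw [if_neg hc2, if_neg (by rintro ⟨h1, h2, h3⟩; exact hc2 ⟨by omega, by omega, h3⟩)]
      · rw [if_neg hcs, ih (s+1) _ j hj]
        by_cases hc2 : s + 1 ≤ j ∧ j < s + 1 + n ∧ cur.getD j 0 = bg
        · rw [if_pos hc2, if_pos ⟨by omega, by omega, hc2.2.2⟩]
        · rw [if_neg hc2]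
          by_cases hsj : s = j
          · subst hsj; rw [if_neg (by rintro ⟨_, _, h3⟩; exact hcs h3)]
          · rw [if_neg (by rintro ⟨h1, h2, h3⟩; exact hc2 ⟨by omega, by omega, h3⟩)]

lemma pvFoldSet_length (bg color : Int) (l : List Nat) :
    ∀ (cur : List Int),
    (l.foldl (fun cur c2 => if cur.getD c2 0 = bg then cur.set c2 color else cur) cur).length
      = cur.length := by
  induction l with
  | nil => intro cur; rfl
  | cons x xs ih =>
      intro cur
      rw [List.foldl_cons]
      by_cases h : cur.getD x 0 = bg
      · rw [if_pos h, ih]; exact List.length_set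
      · rw [if_neg h, ih]

-- ---- dictionary characterisation ----
lemma pvSeen_succ (row : List Int) (bg : Int) (k : Nat) :
    pvSeen row bg (k + 1)
      = if row.getD k 0 ≠ bg then (pvSeen row bg k).insert (row.getD k 0) k
        else pvSeen row bg k := by
  simp [pvSeen, List.range_succ]

lemma pvSeen_get (row : List Int) (bg : Int) (k : Nat) (v : Int) (hv : v ≠ bg) :
    (pvSeen row bg k).get? v = ((List.range k).filter (fun a => row.getD a 0 == v)).getLast? := by
  induction k with
  | zero => simp [pvSeen]
  | succ k ih =>
      rw [pvSeen_succ, List.range_succ, List.filter_append]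
      by_cases hkv : row.getD k 0 = v
      · have hb : (row.getD k 0 == v) = true := beq_iff_eq.mpr hkv
        have hf : List.filter (fun a => row.getD a 0 == v) [k] = [k] := by
          rw [List.filter_singleton, hb, cond_true]
        rw [if_pos (by rw [hkv]; exact hv), hkv, PySem.Dict.get?_insert_self, hf,
          List.getLast?_concat]
      · have hb : (row.getD k 0 == v) = false := beq_eq_false_iff_ne.mpr (fun h => hkv h)
        have hfilt : List.filter (fun a => row.getD a 0 == v) [k] = [] := by
          rw [List.filter_singleton, hb, cond_false]
        rw [hfilt, List.append_nil]
        by_cases hkbg : row.getD k 0 = bg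
        · rw [if_neg (by simpa using hkbg), ih]
        · rw [if_pos hkbg, PySem.Dict.get?_insert_of_ne _ _ (fun h => hkv h.symm), ih]

lemma pvPrevB_aux (row : List Int) (bg : Int) (k : Nat) :
    (List.range k).foldl (fun (st : PySem.Dict Int Nat × List (Option Nat)) b =>
        let v := row.getD b 0
        if v ≠ bg then (st.1.insert v b, st.2 ++ [st.1.get? v])
        else (st.1, st.2 ++ [none])) (PySem.Dict.empty, [])
      = (pvSeen row bg k, (List.range k).map (pvPO row bg)) := by
  induction k with
  | zero => simp [pvSeen]
  | succ k ih =>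
      rw [List.range_succ, List.foldl_append, ih, List.foldl_cons, List.foldl_nil]
      simp only []
      by_cases h : row.getD k 0 ≠ bg
      · rw [if_pos h]
        refine Prod.ext ?_ ?_
        · simp only [pvSeen_succ, if_pos h]
        · simp only [List.map_append, List.map_cons, List.map_nil]
          congr 1
          rw [pvSeen_get row bg k _ h, pvPO, if_neg h]
      · rw [if_neg h]
        rw [not_not] at h
        refine Prod.ext ?_ ?_
        · simp only [pvSeen_succ, h]; simp
        · simp only [List.map_append, List.map_cons, List.map_nil]
          congr 1
          rw [pvPO, if_pos h]

-- ---- B's prev table is the closed-form previous-occurrence table ----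
lemma pvPrevB_eq (row : List Int) (bg : Int) (C : Nat) :
    pvPrevB row bg C = (List.range C).map (pvPO row bg) := by
  rw [pvPrevB, pvPrevB_aux]

-- ---- fill characterisation ----
lemma pvRowFill_length (bg color : Int) (a c : Nat) (cur : List Int) :
    (pvRowFill bg color a c cur).length = cur.length := by
  exact pvFoldSet_length bg color _ cur

lemma pvRowFill_getD (bg color : Int) (a c : Nat) (cur : List Int) (j : Nat) (hj : j < cur.length) :
    (pvRowFill bg color a c cur).getD j 0 =
      if a + 1 ≤ j ∧ j < c ∧ cur.getD j 0 = bg then color else cur.getD j 0 := by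
  rw [pvRowFill, pvFillAux bg color _ _ _ _ hj]
  by_cases h : a + 1 ≤ j ∧ j < a + 1 + (c - (a + 1)) ∧ cur.getD j 0 = bg
  · rw [if_pos h, if_pos ⟨h.1, by omega, h.2.2⟩]
  · rw [if_neg h, if_neg (by rintro ⟨h1, h2, h3⟩; exact h ⟨h1, by omega, h3⟩)]

-- ---- spec-row toolkit ----
lemma pvSpecRow_length (row : List Int) (bg : Int) (k : Nat) :
    (pvSpecRow row bg k).length = row.length := by
  simp [pvSpecRow]

lemma pvSpecRow_getD (row : List Int) (bg : Int) (k j : Nat) (hj : j < row.length) :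
    (pvSpecRow row bg k).getD j 0
      = if row.getD j 0 ≠ bg then row.getD j 0 else pvFillUpto row bg k j := by
  have h2 : j < (pvSpecRow row bg k).length := by rw [pvSpecRow_length]; exact hj
  rw [List.getD_eq_getElem _ _ h2, List.getD_eq_getElem row 0 hj]
  simp only [pvSpecRow, List.getElem_mapIdx]

lemma pvFillUpto_zero (row : List Int) (bg : Int) (c : Nat) :
    pvFillUpto row bg 0 c = bg := by
  simp [pvFillUpto]

lemma pvSpecRow_zero (row : List Int) (bg : Int) : pvSpecRow row bg 0 = row := by
  apply List.ext_getElem (by simp [pvSpecRow])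
  intro i h1 h2
  simp only [pvSpecRow, List.getElem_mapIdx]
  by_cases h : row[i] ≠ bg
  · rw [if_pos h]
  · rw [if_neg h, pvFillUpto_zero]
    exact (not_not.mp h).symm

lemma pvPred_ne_bg (row : List Int) (bg : Int) (c b : Nat) (h : pvPred row bg c b = true) :
    row.getD b 0 ≠ bg := by
  intro hbg
  rw [pvPred, pvPO, if_pos hbg] at h
  exact Bool.noConfusion h

lemma pvPO_eq_get? (row : List Int) (bg : Int) (k : Nat) (hv : ¬ row.getD k 0 = bg) :
    pvPO row bg k = (pvSeen row bg k).get? (row.getD k 0) := by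
  rw [pvPO, if_neg hv, pvSeen_get row bg k _ hv]

lemma pvFillUpto_succ (row : List Int) (bg : Int) (k c : Nat) :
    pvFillUpto row bg (k + 1) c =
      if (List.range k).find? (fun b => decide (c < b) && pvPred row bg c b) = none
      then (if c < k ∧ pvPred row bg c k = true then row.getD k 0 else bg)
      else pvFillUpto row bg k c := by
  rw [pvFillUpto, List.range_succ, List.find?_append]
  cases hf : (List.range k).find? (fun b => decide (c < b) && pvPred row bg c b) with
  | some b =>
      rw [if_neg (by simp), pvFillUpto, hf]
      rfl
  | none =>
      rw [if_pos rfl, Option.none_or, List.find?_singleton]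
      by_cases h : c < k ∧ pvPred row bg c k = true
      · rw [if_pos h]
        have : (decide (c < k) && pvPred row bg c k) = true := by
          rw [h.2, decide_eq_true h.1]; rfl
        rw [this]; rfl
      · rw [if_neg h]
        have : (decide (c < k) && pvPred row bg c k) = false := by
          by_cases h1 : c < k
          · have h2 : pvPred row bg c k = false := by
              cases h3 : pvPred row bg c k
              · rfl
              · exact absurd ⟨h1, h3⟩ h
            rw [h2, Bool.and_false]
          · rw [decide_eq_false h1, Bool.false_and]
        rw [this]; rfl

lemma pvFillUpto_succ_stable (row : List Int) (bg : Int) (k c : Nat)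
    (h : pvPred row bg c k = false) :
    pvFillUpto row bg (k + 1) c = pvFillUpto row bg k c := by
  rw [pvFillUpto_succ]
  by_cases hf : (List.range k).find? (fun b => decide (c < b) && pvPred row bg c b) = none
  · rw [if_pos hf, if_neg (by rintro ⟨_, h2⟩; rw [h] at h2; exact Bool.noConfusion h2)]
    rw [pvFillUpto, hf]
  · rw [if_neg hf]

lemma pvSpecRow_succ_stable (row : List Int) (bg : Int) (k : Nat)
    (h : ∀ c, pvPred row bg c k = false) :
    pvSpecRow row bg (k + 1) = pvSpecRow row bg k := by
  apply List.ext_getElem (by rw [pvSpecRow_length, pvSpecRow_length])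
  intro j h1 h2
  have hj : j < row.length := by rw [pvSpecRow_length] at h1; exact h1
  rw [← List.getD_eq_getElem _ 0 h1, ← List.getD_eq_getElem _ 0 h2,
    pvSpecRow_getD row bg (k + 1) j hj, pvSpecRow_getD row bg k j hj,
    pvFillUpto_succ_stable row bg k j (h j)]

-- ---- the row invariant ----
lemma pvRowA_inv (row : List Int) (bg : Int) :
    ∀ (k : Nat), k ≤ row.length →
    (List.range k).foldl (pvRowStep row bg) (PySem.Dict.empty, row)
      = (pvSeen row bg k, pvSpecRow row bg k) := by
  intro k
  induction k with
  | zero => intro _; rw [pvSpecRow_zero]; rfl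
  | succ k ih =>
      intro hk1
      rw [List.range_succ, List.foldl_append, ih (Nat.le_of_succ_le hk1),
        List.foldl_cons, List.foldl_nil, pvRowStep]
      by_cases hv : row.getD k 0 ≠ bg
      · rw [if_pos hv]
        simp only []
        cases hg : (pvSeen row bg k).get? (row.getD k 0) with
        | none =>
            have hpo : pvPO row bg k = none := by rw [pvPO_eq_get? row bg k hv, hg]
            have hstable : ∀ c, pvPred row bg c k = false := by
              intro c; rw [pvPred, hpo]
            refine Prod.ext ?_ ?_
            · rw [pvSeen_succ, if_pos hv]
            · rw [pvSpecRow_succ_stable row bg k hstable]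
        | some a =>
            have hpo : pvPO row bg k = some a := by rw [pvPO_eq_get? row bg k hv, hg]
            refine Prod.ext ?_ ?_
            · rw [pvSeen_succ, if_pos hv]
            · -- the fill step realises exactly the new pairs closing at k
              apply List.ext_getElem
                (by rw [pvRowFill_length, pvSpecRow_length, pvSpecRow_length])
              intro j h1 h2
              have hjr : j < row.length := by
                rw [pvSpecRow_length] at h2; exact h2
              have hjs : j < (pvSpecRow row bg k).length := by
                rw [pvSpecRow_length]; exact hjr
              rw [← List.getD_eq_getElem _ 0 h1, ← List.getD_eq_getElem _ 0 h2,
                pvRowFill_getD _ _ _ _ _ j hjs, pvSpecRow_getD row bg (k + 1) j hjr,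
                pvSpecRow_getD row bg k j hjr]
              by_cases hj : row.getD j 0 ≠ bg
              · rw [if_pos hj, if_pos hj,
                  if_neg (by rintro ⟨_, _, h3⟩; exact hj h3)]
              · have hjeq : row.getD j 0 = bg := not_not.mp hj
                rw [if_neg hj, if_neg hj, pvFillUpto_succ]
                cases hf : (List.range k).find?
                    (fun b => decide (j < b) && pvPred row bg j b) with
                | some b =>
                    have hpred := List.find?_some hf
                    have hbne : row.getD b 0 ≠ bg :=
                      pvPred_ne_bg row bg j b (Bool.and_elim_right hpred)
                    have hfk : pvFillUpto row bg k j = row.getD b 0 := by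
                      rw [pvFillUpto, hf]
                    rw [if_neg (show ¬ (some b = none) by simp), hfk,
                      if_neg (by rintro ⟨_, _, h3⟩; exact hbne h3)]
                | none =>
                    have hfk : pvFillUpto row bg k j = bg := by
                      rw [pvFillUpto, hf]
                    have hpk : pvPred row bg j k = decide (a < j) := by
                      rw [pvPred, hpo]
                    rw [if_pos rfl, hfk, hpk]
                    by_cases hc : a + 1 ≤ j ∧ j < k ∧ bg = bg
                    · rw [if_pos hc, if_pos ⟨hc.2.1, by rw [decide_eq_true (by omega : a < j)]⟩]
                    · rw [if_neg hc,
                        if_neg (by rintro ⟨h1', h2'⟩; exact hc ⟨by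
                          have := of_decide_eq_true h2'; omega, h1', rfl⟩)]
      · rw [if_neg hv]
        have hjeq : row.getD k 0 = bg := not_not.mp hv
        have hstable : ∀ c, pvPred row bg c k = false := by
          intro c; rw [pvPred, pvPO, if_pos hjeq]
        refine Prod.ext ?_ ?_
        · rw [pvSeen_succ, if_neg hv]
        · rw [pvSpecRow_succ_stable row bg k hstable]

-- ---- grid-to-row reductions ----
lemma pvGridFill_aux (bg color : Int) (i : Nat) (l : List Nat) :
    ∀ (r : List (List Int)), i < r.length →
    l.foldl (fun r c2 => if (r.getD i []).getD c2 0 = bg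
        then r.modify i (fun row => row.set c2 color) else r) r
      = r.set i (l.foldl (fun cur c2 => if cur.getD c2 0 = bg then cur.set c2 color else cur)
          (r.getD i [])) := by
  induction l with
  | nil =>
      intro r hi
      rw [List.foldl_nil, List.foldl_nil, List.getD_eq_getElem r [] hi, List.set_getElem_self]
  | cons c2 l ih =>
      intro r hi
      rw [List.foldl_cons, List.foldl_cons]
      by_cases h : (r.getD i []).getD c2 0 = bg
      · rw [if_pos h, if_pos h]
        have hmod : r.modify i (fun row => row.set c2 color)
            = r.set i ((r.getD i []).set c2 color) := by
          rw [List.modify_eq_set, ← List.getD_eq_getElem?_getD]; rfl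
        rw [hmod, ih (r.set i ((r.getD i []).set c2 color)) (by simpa using hi)]
        have hget : (r.set i ((r.getD i []).set c2 color)).getD i []
            = (r.getD i []).set c2 color := by
          rw [pv_getD_set _ _ _ _ _ hi, if_pos rfl]
        rw [hget, List.set_set]
      · rw [if_neg h, if_neg h, ih r hi]

lemma pvFillA_set (bg color : Int) (a c i : Nat)
    (r : List (List Int)) (hi : i < r.length) :
    pvFillA bg color a c i r = r.set i (pvRowFill bg color a c (r.getD i [])) := by
  rw [pvFillA, pvRowFill, pvGridFill_aux bg color i _ r hi]

lemma pvStepA_inner (g : List (List Int)) (bg : Int) (i : Nat) (l : List Nat) :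
    ∀ (d : PySem.Dict Int Nat) (r : List (List Int)), i < r.length →
    l.foldl (pvStepA g bg i) (d, r)
      = ((l.foldl (pvRowStep (g.getD i []) bg) (d, r.getD i [])).1,
         r.set i (l.foldl (pvRowStep (g.getD i []) bg) (d, r.getD i [])).2) := by
  induction l with
  | nil =>
      intro d r hi
      rw [List.foldl_nil, List.foldl_nil]
      refine Prod.ext rfl ?_
      rw [List.getD_eq_getElem r [] hi, List.set_getElem_self]
  | cons c l ih =>
      intro d r hi
      rw [List.foldl_cons, List.foldl_cons]
      simp only [pvStepA, pvRowStep]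
      by_cases h : (g.getD i []).getD c 0 ≠ bg
      · rw [if_pos h, if_pos h]
        cases hg : d.get? ((g.getD i []).getD c 0) with
        | none => exact ih (d.insert ((g.getD i []).getD c 0) c) r hi
        | some a =>
            simp only []
            rw [pvFillA_set bg ((g.getD i []).getD c 0) a c i r hi,
              ih (d.insert ((g.getD i []).getD c 0) c)
                (r.set i (pvRowFill bg ((g.getD i []).getD c 0) a c (r.getD i [])))
                (by simpa using hi)]
            have hget : (r.set i (pvRowFill bg ((g.getD i []).getD c 0) a c (r.getD i []))).getD i []
                = pvRowFill bg ((g.getD i []).getD c 0) a c (r.getD i []) := by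
              rw [pv_getD_set _ _ _ _ _ hi, if_pos rfl]
            rw [hget, List.set_set]
      · rw [if_neg h, if_neg h]
        exact ih d r hi

lemma pvOuter_aux (g : List (List Int)) (h : Nat → List Int → List Int) :
    ∀ (k : Nat), k ≤ g.length →
    (List.range k).foldl (fun r i => r.set i (h i (r.getD i []))) g
      = g.mapIdx (fun i row => if i < k then h i row else row) := by
  intro k
  induction k with
  | zero =>
      intro _
      rw [List.range_zero, List.foldl_nil]
      apply List.ext_getElem (by simp)
      intro j h1 h2
      rw [List.getElem_mapIdx, if_neg (Nat.not_lt_zero _)]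
  | succ k ih =>
      intro hk1
      rw [List.range_succ, List.foldl_append, ih (Nat.le_of_succ_le hk1),
        List.foldl_cons, List.foldl_nil]
      have hkl : k < g.length := hk1
      have hMk : (g.mapIdx (fun i row => if i < k then h i row else row)).getD k []
          = g[k] := by
        rw [List.getD_eq_getElem _ _ (by rw [List.length_mapIdx]; exact hkl),
          List.getElem_mapIdx, if_neg (lt_irrefl k)]
      rw [hMk]
      apply List.ext_getElem (by simp)
      intro j h1 h2
      rw [List.getElem_set, List.getElem_mapIdx]
      by_cases hjk : k = j
      · subst hjk
        rw [if_pos rfl, List.getElem_mapIdx, if_pos (by omega : k < k + 1)]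
      · rw [if_neg hjk, List.getElem_mapIdx]
        by_cases hlt : j < k
        · rw [if_pos hlt, if_pos (by omega)]
        · rw [if_neg hlt, if_neg (by omega)]

lemma pvOuter (g : List (List Int)) (h : Nat → List Int → List Int) :
    (List.range g.length).foldl (fun r i => r.set i (h i (r.getD i []))) g
      = g.mapIdx h := by
  rw [pvOuter_aux g h g.length (le_refl _)]
  apply List.ext_getElem (by simp)
  intro j h1 h2
  rw [List.getElem_mapIdx, List.getElem_mapIdx,
    if_pos (by rw [List.length_mapIdx] at h1; exact h1)]

-- find? congruence on members (no library lemma found for this shape)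
lemma pvFind?_congr {α : Type} (p q : α → Bool) (l : List α) (h : ∀ x ∈ l, p x = q x) :
    l.find? p = l.find? q := by
  induction l with
  | nil => rfl
  | cons x xs ih =>
      rw [List.find?_cons, List.find?_cons, h x List.mem_cons_self]
      split
      · rfl
      · exact ih (fun y hy => h y (List.mem_cons_of_mem _ hy))

lemma pvFind_eq (row : List Int) (bg : Int) (C j : Nat) (hj : j < C) :
    (List.range C).find? (fun b => decide (j < b) && pvPred row bg j b)
      = (List.range' (j + 1) (C - (j + 1))).find? (fun b =>
          match ((List.range C).map (pvPO row bg)).getD b none with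
          | some a => decide (a < j)
          | none => false) := by
  have hsplit : List.range C = List.range (j + 1) ++ List.range' (j + 1) (C - (j + 1)) := by
    rw [List.range_eq_range', List.range_eq_range',
      show C = (j + 1) + (C - (j + 1)) from by omega, ← List.range'_append]
    simp
  conv_lhs => rw [hsplit]
  rw [List.find?_append]
  have h1 : (List.range (j + 1)).find? (fun b => decide (j < b) && pvPred row bg j b) = none := by
    rw [List.find?_eq_none]
    intro x hx
    have hxj : x < j + 1 := List.mem_range.mp hx
    rw [decide_eq_false (by omega : ¬ j < x), Bool.false_and]
    exact Bool.false_ne_true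
  rw [h1, Option.none_or]
  apply pvFind?_congr
  intro b hb
  have hbm := List.mem_range'_1.mp hb
  have hbC : b < C := by omega
  have hmap : ((List.range C).map (pvPO row bg)).getD b none = pvPO row bg b := by
    rw [List.getD_eq_getElem _ _ (by simp [hbC]), List.getElem_map, List.getElem_range]
  rw [decide_eq_true (by omega : j < b), Bool.true_and, hmap]
  rfl

-- ---- per-row final equality ----

-- value B writes into a background cell j (bg when the search fails)
def pvCellFill (row : List Int) (bg : Int) (C j : Nat) : Int :=
  match pvFindB (pvPrevB row bg C) C j with
  | some b => row.getD b 0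
  | none => bg

-- B's `new` after the first k iterations of the fill loop
def pvPartB (row : List Int) (bg : Int) (C k : Nat) : List Int :=
  row.mapIdx (fun j v => if j < k ∧ v = bg then pvCellFill row bg C j else v)

lemma pvPartB_length (row : List Int) (bg : Int) (C k : Nat) :
    (pvPartB row bg C k).length = row.length := by
  simp [pvPartB]

lemma pvPartB_zero (row : List Int) (bg : Int) (C : Nat) : pvPartB row bg C 0 = row := by
  apply List.ext_getElem (by simp [pvPartB])
  intro j h1 h2
  simp only [pvPartB, List.getElem_mapIdx]
  rw [if_neg (by rintro ⟨h, _⟩; exact Nat.not_lt_zero _ h)]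

lemma pvPartB_getD (row : List Int) (bg : Int) (C k j : Nat) (hj : j < row.length) :
    (pvPartB row bg C k).getD j 0
      = if j < k ∧ row.getD j 0 = bg then pvCellFill row bg C j else row.getD j 0 := by
  rw [List.getD_eq_getElem _ _ (by rw [pvPartB_length]; exact hj),
    List.getD_eq_getElem row 0 hj]
  simp only [pvPartB, List.getElem_mapIdx]

lemma pvPartB_succ_of_ne (row : List Int) (bg : Int) (C k : Nat)
    (h : ¬ row.getD k 0 = bg) :
    pvPartB row bg C (k + 1) = pvPartB row bg C k := by
  apply List.ext_getElem (by rw [pvPartB_length, pvPartB_length])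
  intro j h1 h2
  have hj : j < row.length := by rw [pvPartB_length] at h1; exact h1
  rw [← List.getD_eq_getElem _ 0 h1, ← List.getD_eq_getElem _ 0 h2,
    pvPartB_getD row bg C (k + 1) j hj, pvPartB_getD row bg C k j hj]
  by_cases hc : j < k ∧ row.getD j 0 = bg
  · rw [if_pos hc, if_pos (show j < k + 1 ∧ row.getD j 0 = bg from ⟨by omega, hc.2⟩)]
  · rw [if_neg hc, if_neg (by
      rintro ⟨h1', h2'⟩
      rcases Nat.lt_succ_iff_lt_or_eq.mp h1' with h' | h'
      · exact hc ⟨h', h2'⟩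
      · subst h'; exact h h2')]

lemma pvRowB_inv (row : List Int) (bg : Int) (C : Nat) (hC : C ≤ row.length) :
    ∀ (k : Nat), k ≤ C →
    (List.range k).foldl (fun new c =>
        if row.getD c 0 = bg then
          match pvFindB (pvPrevB row bg C) C c with
          | some b => new.set c (row.getD b 0)
          | none => new
        else new) row = pvPartB row bg C k := by
  intro k
  induction k with
  | zero => intro _; rw [List.range_zero, List.foldl_nil, pvPartB_zero]
  | succ k ih =>
      intro hk1
      rw [List.range_succ, List.foldl_append, ih (Nat.le_of_succ_le hk1),
        List.foldl_cons, List.foldl_nil]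
      by_cases hv : row.getD k 0 = bg
      · rw [if_pos hv]
        have hkr : k < row.length := by omega
        cases hf : pvFindB (pvPrevB row bg C) C k with
        | none =>
            have hcell : pvCellFill row bg C k = bg := by rw [pvCellFill, hf]
            apply List.ext_getElem (by rw [pvPartB_length, pvPartB_length])
            intro j h1 h2
            have hj : j < row.length := by rw [pvPartB_length] at h1; exact h1
            rw [← List.getD_eq_getElem _ 0 h1, ← List.getD_eq_getElem _ 0 h2,
              pvPartB_getD row bg C (k + 1) j hj, pvPartB_getD row bg C k j hj]
            by_cases hc : j < k ∧ row.getD j 0 = bg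
            · rw [if_pos hc, if_pos (show j < k + 1 ∧ row.getD j 0 = bg from ⟨by omega, hc.2⟩)]
            · rw [if_neg hc]
              by_cases hc' : j < k + 1 ∧ row.getD j 0 = bg
              · have hjk : j = k := by
                  rcases Nat.lt_succ_iff_lt_or_eq.mp hc'.1 with h' | h'
                  · exact absurd ⟨h', hc'.2⟩ hc
                  · exact h'
                subst hjk
                rw [if_pos hc', hcell, hc'.2]
              · rw [if_neg hc']
        | some b =>
            have hcell : pvCellFill row bg C k = row.getD b 0 := by rw [pvCellFill, hf]
            apply List.ext_getElem
              (by rw [List.length_set, pvPartB_length, pvPartB_length])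
            intro j h1 h2
            have hj : j < row.length := by
              rw [List.length_set, pvPartB_length] at h1; exact h1
            have hjp : j < (pvPartB row bg C k).length := by rw [pvPartB_length]; exact hj
            rw [← List.getD_eq_getElem _ 0 h1, ← List.getD_eq_getElem _ 0 h2,
              pv_getD_set _ _ _ _ _ hjp, pvPartB_getD row bg C (k + 1) j hj,
              pvPartB_getD row bg C k j hj]
            by_cases hkj : k = j
            · subst hkj
              rw [if_pos rfl, if_pos ⟨Nat.lt_succ_self _, hv⟩, hcell]
            · rw [if_neg hkj]
              by_cases hc : j < k ∧ row.getD j 0 = bg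
              · rw [if_pos hc, if_pos (show j < k + 1 ∧ row.getD j 0 = bg from ⟨by omega, hc.2⟩)]
              · rw [if_neg hc, if_neg (by
                  rintro ⟨h1', h2'⟩
                  rcases Nat.lt_succ_iff_lt_or_eq.mp h1' with h' | h'
                  · exact hc ⟨h', h2'⟩
                  · exact hkj h'.symm)]
      · rw [if_neg hv, pvPartB_succ_of_ne row bg C k hv]

lemma pvCellFill_eq_fillUpto (row : List Int) (bg : Int) (C j : Nat) (hj : j < C) :
    pvCellFill row bg C j = pvFillUpto row bg C j := by
  rw [pvCellFill, pvFindB, pvPrevB_eq, pvFillUpto, pvFind_eq row bg C j hj]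

lemma pvSpecRow_eq_rowB (row : List Int) (bg : Int) (C : Nat) (hC : C ≤ row.length) :
    pvSpecRow row bg C = pvRowB row bg C := by
  rw [pvRowB]
  rw [pvRowB_inv row bg C hC C (le_refl _)]
  apply List.ext_getElem (by rw [pvSpecRow_length, pvPartB_length])
  intro j h1 h2
  have hj : j < row.length := by rw [pvSpecRow_length] at h1; exact h1
  rw [← List.getD_eq_getElem _ 0 h1, ← List.getD_eq_getElem _ 0 h2,
    pvSpecRow_getD row bg C j hj, pvPartB_getD row bg C C j hj]
  by_cases hbg : row.getD j 0 ≠ bg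
  · rw [if_pos hbg, if_neg (by rintro ⟨_, h2'⟩; exact hbg h2')]
  · have hbg' : row.getD j 0 = bg := not_not.mp hbg
    rw [if_neg hbg]
    by_cases hjC : j < C
    · rw [if_pos ⟨hjC, hbg'⟩, pvCellFill_eq_fillUpto row bg C j hjC]
    · rw [if_neg (by rintro ⟨h1', _⟩; exact hjC h1')]
      have hfill : pvFillUpto row bg C j = bg := by
        rw [pvFillUpto, List.find?_eq_none.mpr]
        intro x hx
        rw [decide_eq_false (by have := List.mem_range.mp hx; omega : ¬ j < x),
          Bool.false_and]
        exact Bool.false_ne_true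
      rw [hfill, hbg']

lemma pvFoldA_steps (g : List (List Int)) (bg : Int) (C : Nat) (l : List Nat) :
    ∀ (r : List (List Int)), r.length = g.length → (∀ i ∈ l, i < g.length) →
    l.foldl (fun r i => ((List.range C).foldl (pvStepA g bg i) (PySem.Dict.empty, r)).2) r
      = l.foldl (fun r i =>
          r.set i (((List.range C).foldl (pvRowStep (g.getD i []) bg)
            (PySem.Dict.empty, r.getD i [])).2)) r := by
  induction l with
  | nil => intro r _ _; rfl
  | cons i l ih =>
      intro r hr hmem
      rw [List.foldl_cons, List.foldl_cons,
        pvStepA_inner g bg i (List.range C) PySem.Dict.empty r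
          (by rw [hr]; exact hmem i List.mem_cons_self)]
      exact ih _ (by rw [List.length_set]; exact hr)
        (fun x hx => hmem x (List.mem_cons_of_mem _ hx))

theorem connect_pairs_h_py_spec : Claim_equal_connect_pairs_h_py := by
  intro g bg _hdom hpre
  obtain ⟨hne, hlen⟩ := hpre
  unfold Spec_connect_pairs_h_py
  have hA : connect_pairs_h_py g bg
      = (List.range g.length).foldl
          (fun r i => ((List.range (g.headD []).length).foldl (pvStepA g bg i)
            (PySem.Dict.empty, r)).2) g := rfl
  have hB : connect_pairs_h_py_alt g bg
      = g.map (fun row => pvRowB row bg (g.headD []).length) := rfl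
  rw [hA, hB,
    pvFoldA_steps g bg (g.headD []).length (List.range g.length) g rfl
      (fun i hi => List.mem_range.mp hi),
    pvOuter g (fun i cur => ((List.range (g.headD []).length).foldl
      (pvRowStep (g.getD i []) bg) (PySem.Dict.empty, cur)).2)]
  apply List.ext_getElem (by simp)
  intro i h1 h2
  rw [List.getElem_mapIdx, List.getElem_map]
  have hil : i < g.length := by rw [List.length_mapIdx] at h1; exact h1
  have hrow : g.getD i [] = g[i] := List.getD_eq_getElem g [] hil
  have hC : (g.headD []).length ≤ g[i].length := hlen g[i] (List.getElem_mem hil)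
  rw [hrow, pvRowA_inv g[i] bg (g.headD []).length hC,
    pvSpecRow_eq_rowB g[i] bg (g.headD []).length hC]
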